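-- pv_equiv track=rewrite | github.com/gongtian1234/-offer | test44_数字序列中某一位的数字.py | digitAtIndex
-- ===== SOURCE A (Python) =====
-- def digitAtIndex(index):
--     if index<0:
--         return
--     if index==0:
--         return 0
--     weishu = 1
--     tmpIndex = index-1    # 减1是因为targetNum中10的次方，在位数为1时，会多加一个1
--     while 9*10**(weishu-1)*weishu<tmpIndex:
--         tmpIndex -= 9*10**(weishu-1)*weishu
--         weishu += 1
--     targetNum = (tmpIndex // weishu) + 10**(weishu-1)
--     diJiWei = tmpIndex%weishu
--     return str(targetNum)[diJiWei]
-- ===== SOURCE B (Python) =====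
-- def _total(n):
--     # closed-form length of the string '0' + '1' + ... + str(n)
--     d = len(str(n))
--     return 1 + d * (n + 1) - (10 ** d - 1) // 9
--
-- def digitAtIndex(index):
--     # Binary search for the number whose decimal expansion contains position
--     # `index` of the infinite digit string '0123456789101112...', using the
--     # closed-form count _total; no block-subtraction loop, no digit arithmetic.
--     # (At index 0 this returns the string '0'; A returns the int 0 there,
--     # which is not a str -- that input is excluded by Pre_.)
--     if index < 0:
--         return None
--     lo, hi = 0, index
--     while lo < hi:
--         mid = (lo + hi) // 2
--         if index < _total(mid):
--             hi = mid
--         else: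
--             lo = mid + 1
--     return str(lo)[index - (_total(lo) - len(str(lo)))]
-- ===== Notes on version B (the rewrite author's own statement) =====
-- stated objective: alternative
-- what changed: B drops A's sequential block-subtraction loop and floordiv/mod digit arithmetic entirely: it binary-searches for the number containing the indexed position, using a closed-form count (1 + d*(n+1) - (10**d-1)//9) of the digits written up to n, then indexes into str of that number.
-- outside the precondition, e.g. on digitAtIndex(0): A returns 0, B returns '0'
import Mathlib
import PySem

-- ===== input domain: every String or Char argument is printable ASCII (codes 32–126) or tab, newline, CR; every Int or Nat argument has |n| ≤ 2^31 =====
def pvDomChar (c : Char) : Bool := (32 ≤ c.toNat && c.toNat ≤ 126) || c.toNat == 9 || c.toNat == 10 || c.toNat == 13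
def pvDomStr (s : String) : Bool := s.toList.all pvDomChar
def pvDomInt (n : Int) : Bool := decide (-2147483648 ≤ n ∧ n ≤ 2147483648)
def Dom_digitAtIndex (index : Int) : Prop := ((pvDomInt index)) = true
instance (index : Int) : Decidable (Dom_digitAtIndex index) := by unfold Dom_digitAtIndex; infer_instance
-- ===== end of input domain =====

-- B replaces A's block-subtraction loop and floordiv/mod digit arithmetic with a binary
-- search over the numbers, driven by a closed-form count of the digits written up to n;
-- objective: alternative (same order of cost, different algorithm).


-- ===== PORT A =====
-- A's while loop.  Python's `weishu` is always ≥ 1, so it is ported as wm1 = weishu - 1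
-- (a Nat), making the exponent `10**(weishu-1)` the Nat power 10^wm1; otherwise step for step.
def pvALoop (tmpIndex : Int) (wm1 : Nat) : Int × Nat :=
  if 9 * 10 ^ wm1 * ((wm1 : Int) + 1) < tmpIndex then
    pvALoop (tmpIndex - 9 * 10 ^ wm1 * ((wm1 : Int) + 1)) (wm1 + 1)
  else (tmpIndex, wm1)
termination_by tmpIndex.toNat
decreasing_by
  have hb : (0 : Int) < 9 * 10 ^ wm1 * ((wm1 : Int) + 1) := by positivity
  omega

def digitAtIndex (index : Int) : Option String :=
  if index < 0 then none
  else if index = 0 then none   -- Python returns the int 0 here, not a str: excluded by Pre_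
  else
    let p := pvALoop (index - 1) 0
    let weishu : Int := (p.2 : Int) + 1
    let targetNum := PySem.Int.floordiv p.1 weishu + 10 ^ p.2
    let diJiWei := PySem.Int.mod p.1 weishu
    -- str(targetNum)[diJiWei]: Python yields a 1-character string
    (PySem.Str.pyGet? (PySem.Int.toStr targetNum) diJiWei).map (fun c => String.ofList [c])

-- ===== PORT B =====
-- B's helper _total; Python's len(str(n)) is the length of the digit-character list,
-- a Nat d, so 10**d is the Nat power; otherwise step for step.
def pvTotal (n : Int) : Int :=
  1 + ((PySem.Int.toChars n).length : Int) * (n + 1)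
    - PySem.Int.floordiv (10 ^ (PySem.Int.toChars n).length - 1) 9

-- B's while loop (the binary search), step for step
def pvBS (index lo hi : Int) : Int :=
  if h : lo < hi then
    let mid := PySem.Int.floordiv (lo + hi) 2
    if index < pvTotal mid then pvBS index lo mid else pvBS index (mid + 1) hi
  else lo
termination_by (hi - lo).toNat
decreasing_by
  · have hlt : PySem.Int.floordiv (lo + hi) 2 < hi :=
      (PySem.Int.floordiv_lt_iff_lt_mul (by omega)).mpr (by omega)
    omega
  · have hle : lo ≤ PySem.Int.floordiv (lo + hi) 2 :=
      (PySem.Int.le_floordiv_iff_mul_le (by omega)).mpr (by omega)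
    omega

def digitAtIndex_alt (index : Int) : Option String :=
  if index < 0 then none
  else
    let lo := pvBS index 0 index
    -- str(lo)[index - (_total(lo) - len(str(lo)))]: a 1-character string
    (PySem.Str.pyGet? (PySem.Int.toStr lo)
      (index - (pvTotal lo - ((PySem.Int.toChars lo).length : Int)))).map
      (fun c => String.ofList [c])

-- ===== PRECONDITION & SPEC =====
-- Pre_ excludes only index = 0, where A returns the Python int 0 — not a value of the
-- declared str return type (Option String); B returns the string '0' there.
def Pre_digitAtIndex (index : Int) : Prop := index ≠ 0
instance (index : Int) : Decidable (Pre_digitAtIndex index) := by unfold Pre_digitAtIndex; infer_instance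
def pvWitness_digitAtIndex : Int := 190

def Spec_digitAtIndex (index : Int) (out : Option String) : Prop := out = digitAtIndex_alt index
instance (index : Int) (out : Option String) : Decidable (Spec_digitAtIndex index out) := by unfold Spec_digitAtIndex; infer_instance

-- ===== CLAIM =====
def Claim_equal_digitAtIndex : Prop := ∀ (index : Int), Dom_digitAtIndex index → Pre_digitAtIndex index → Spec_digitAtIndex index (digitAtIndex index)

-- ===== LEMMAS AND PROOFS =====

-- toDigitsCore appends to its accumulator
lemma pvCore_acc (f : Nat) : ∀ (n : Nat) (acc : List Char),
    Nat.toDigitsCore 10 f n acc = Nat.toDigitsCore 10 f n [] ++ acc := by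
  induction f with
  | zero => intro n acc; simp [Nat.toDigitsCore]
  | succ f ih =>
    intro n acc
    simp only [Nat.toDigitsCore]
    by_cases h : n / 10 = 0
    · simp [h]
    · simp only [h, if_false]
      rw [ih (n / 10) (Nat.digitChar (n % 10) :: acc), ih (n / 10) [Nat.digitChar (n % 10)]]
      simp

-- fuel irrelevance, given enough fuel
lemma pvCore_fuel : ∀ (n f f' : Nat), n < f → n < f' →
    Nat.toDigitsCore 10 f n [] = Nat.toDigitsCore 10 f' n [] := by
  intro n
  induction n using Nat.strong_induction_on with
  | _ n ih =>
    intro f f' hf hf'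
    obtain ⟨g, rfl⟩ : ∃ g, f = g + 1 := ⟨f - 1, by omega⟩
    obtain ⟨g', rfl⟩ : ∃ g', f' = g' + 1 := ⟨f' - 1, by omega⟩
    simp only [Nat.toDigitsCore]
    by_cases h : n / 10 = 0
    · simp [h]
    · simp only [h, if_false]
      rw [pvCore_acc g (n / 10) [Nat.digitChar (n % 10)],
          pvCore_acc g' (n / 10) [Nat.digitChar (n % 10)]]
      have hn10 : n / 10 < n := Nat.div_lt_self (by omega) (by omega)
      rw [ih (n / 10) hn10 g g' (by omega) (by omega)]

lemma pvToDigits_small {m : Nat} (h : m < 10) :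
    Nat.toDigits 10 m = [Nat.digitChar m] := by
  simp [Nat.toDigits, Nat.toDigitsCore, Nat.div_eq_of_lt h, Nat.mod_eq_of_lt h]

lemma pvToDigits_step {m : Nat} (h : 10 ≤ m) :
    Nat.toDigits 10 m = Nat.toDigits 10 (m / 10) ++ [Nat.digitChar (m % 10)] := by
  have h10 : m / 10 ≠ 0 := by
    have : 1 ≤ m / 10 := (Nat.one_le_div_iff (by omega)).mpr (by omega)
    omega
  simp only [Nat.toDigits, Nat.toDigitsCore, h10, if_false]
  rw [pvCore_acc m (m / 10) [Nat.digitChar (m % 10)]]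
  congr 1
  exact pvCore_fuel (m / 10) m (m / 10 + 1) (Nat.div_lt_self (by omega) (by omega)) (by omega)

lemma pvToDigits_len : ∀ (k m : Nat), 10 ^ k ≤ m → m < 10 ^ (k + 1) →
    (Nat.toDigits 10 m).length = k + 1 := by
  intro k
  induction k with
  | zero => intro m h1 h2; rw [pvToDigits_small (by simpa using h2)]; rfl
  | succ k ih =>
    intro m h1 h2
    have h10 : (10:Nat) ^ 1 ≤ 10 ^ (k + 1) := Nat.pow_le_pow_right (by omega) (by omega)
    have hm : 10 ≤ m := le_trans (by simpa using h10) h1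
    rw [pvToDigits_step hm, List.length_append]
    have hd1 : 10 ^ k ≤ m / 10 := (Nat.le_div_iff_mul_le (by omega)).mpr (by
      have h : 10 ^ k * 10 = 10 ^ (k + 1) := by ring
      omega)
    have hd2 : m / 10 < 10 ^ (k + 1) := (Nat.div_lt_iff_lt_mul (by omega)).mpr (by
      have h : 10 ^ (k + 1) * 10 = 10 ^ (k + 2) := by ring
      omega)
    rw [ih (m / 10) hd1 hd2]
    rfl

lemma pvToChars_nat (m : Nat) : PySem.Int.toChars (m : Int) = Nat.toDigits 10 m := by
  simp [PySem.Int.toChars]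

lemma pvToDigits_pos (n : Nat) : 1 ≤ (Nat.toDigits 10 n).length := by
  by_cases h : n < 10
  · rw [pvToDigits_small h]; simp
  · rw [pvToDigits_step (by omega)]; simp

-- the concatenated sequence '0' + '1' + '2' + … + str(n), as a character list
def catL : Nat → List Char
  | 0 => ['0']
  | n + 1 => catL n ++ Nat.toDigits 10 (n + 1)

lemma pvCatL_succ {m : Nat} (hm : 1 ≤ m) :
    catL m = catL (m - 1) ++ Nat.toDigits 10 m := by
  obtain ⟨n, rfl⟩ : ∃ n, m = n + 1 := ⟨m - 1, by omega⟩
  simp [catL]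

-- total number of digits of the numbers with at most k digits (the '0' counted once)
def pvB : Nat → Nat
  | 0 => 0
  | k + 1 => pvB k + 9 * 10 ^ k * (k + 1)

-- the repunit (10^k - 1) / 9
def pvR : Nat → Nat
  | 0 => 0
  | k + 1 => 10 * pvR k + 1

lemma pvR9 : ∀ (k : Nat), 9 * pvR k + 1 = 10 ^ k := by
  intro k
  induction k with
  | zero => rfl
  | succ k ih =>
    show 9 * (10 * pvR k + 1) + 1 = 10 ^ (k + 1)
    have h : (10:Nat) ^ (k + 1) = 10 * 10 ^ k := by ring
    omega

lemma pvBR : ∀ (k : Nat), (pvB k : Int) = ((k : Int) + 1) * 10 ^ k - pvR (k + 1) := by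
  intro k
  induction k with
  | zero => decide
  | succ k ih =>
    have h1 : (pvR (k + 2) : Int) = 10 * pvR (k + 1) + 1 := by
      show ((10 * pvR (k + 1) + 1 : Nat) : Int) = _
      push_cast; ring
    have h2 : (9 : Int) * pvR (k + 1) + 1 = 10 ^ (k + 1) := by
      exact_mod_cast pvR9 (k + 1)
    have h3 : (pvB (k + 1) : Int) = (pvB k : Int) + 9 * 10 ^ k * ((k : Int) + 1) := by
      show ((pvB k + 9 * 10 ^ k * (k + 1) : Nat) : Int) = _
      push_cast; ring
    rw [h3, ih]
    have hpow : ((10:Int) ^ (k + 1)) = 10 * 10 ^ k := by ring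
    push_cast
    nlinarith [h1, h2, hpow]

lemma pvLen_run : ∀ (k d : Nat), d ≤ 9 * 10 ^ k →
    (catL (10 ^ k - 1 + d)).length = (catL (10 ^ k - 1)).length + d * (k + 1) := by
  intro k d
  induction d with
  | zero => simp
  | succ d ih =>
    intro hd
    have hp : 1 ≤ 10 ^ k := Nat.one_le_pow _ _ (by omega)
    have h1 : 10 ^ k - 1 + (d + 1) = (10 ^ k - 1 + d) + 1 := by omega
    rw [h1]
    show (catL (10 ^ k - 1 + d) ++ Nat.toDigits 10 (10 ^ k - 1 + d + 1)).length = _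
    rw [List.length_append, ih (by omega)]
    have h2 : 10 ^ k - 1 + d + 1 = 10 ^ k + d := by omega
    rw [h2, pvToDigits_len k (10 ^ k + d) (by omega) (by
      have : (10:Nat) ^ (k + 1) = 10 * 10 ^ k := by ring
      omega)]
    ring

lemma pvLen_pow : ∀ (k : Nat), (catL (10 ^ k - 1)).length = 1 + pvB k := by
  intro k
  induction k with
  | zero => simp [catL, pvB]
  | succ k ih =>
    have h1 : (10:Nat) ^ (k + 1) = 10 * 10 ^ k := by ring
    have hp : 1 ≤ 10 ^ k := Nat.one_le_pow _ _ (by omega)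
    have h2 : 10 ^ (k + 1) - 1 = 10 ^ k - 1 + 9 * 10 ^ k := by omega
    rw [h2, pvLen_run k (9 * 10 ^ k) (le_refl _), ih]
    simp [pvB]
    ring

lemma pvLenCat_form (k m : Nat) (h1 : 10 ^ k ≤ m) (h2 : m < 10 ^ (k + 1)) :
    (catL (m - 1)).length = 1 + pvB k + (m - 10 ^ k) * (k + 1) := by
  have hp : 1 ≤ 10 ^ k := Nat.one_le_pow _ _ (by omega)
  have h3 : m - 1 = 10 ^ k - 1 + (m - 10 ^ k) := by omega
  have h4 : m - 10 ^ k ≤ 9 * 10 ^ k := by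
    have : (10:Nat) ^ (k + 1) = 10 * 10 ^ k := by ring
    omega
  rw [h3, pvLen_run k (m - 10 ^ k) h4, pvLen_pow k]

lemma pvCatL_prefix : ∀ (a b : Nat), a ≤ b → (catL a) <+: (catL b) := by
  intro a b
  induction b with
  | zero => intro h; interval_cases a; exact List.prefix_refl _
  | succ b ih =>
    intro h
    by_cases hab : a = b + 1
    · subst hab; exact List.prefix_refl _
    · exact (ih (by omega)).trans ⟨Nat.toDigits 10 (b + 1), rfl⟩

lemma pvCatL_get_mono {a b i : Nat} (hab : a ≤ b) (hi : i < (catL a).length) :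
    (catL a)[i]? = (catL b)[i]? := by
  obtain ⟨t, ht⟩ := pvCatL_prefix a b hab
  rw [← ht, List.getElem?_append_left hi]

lemma pvCatL_get {a b i : Nat} (ha : i < (catL a).length) (hb : i < (catL b).length) :
    (catL a)[i]? = (catL b)[i]? := by
  rcases le_total a b with h | h
  · exact pvCatL_get_mono h ha
  · exact (pvCatL_get_mono h hb).symm

lemma pvCatL_char {m : Nat} (hm : 1 ≤ m) (r : Nat) :
    (catL m)[(catL (m - 1)).length + r]? = (Nat.toDigits 10 m)[r]? := by
  rw [pvCatL_succ hm, List.getElem?_append_right (by omega)]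
  congr 1
  omega

-- B's closed-form count equals the length of the concatenated sequence
lemma pvTotal_eq (n : Nat) : pvTotal (n : Int) = ((catL n).length : Int) := by
  unfold pvTotal
  rw [pvToChars_nat]
  by_cases h0 : n = 0
  · subst h0; decide
  · obtain ⟨k, hk1, hk2⟩ : ∃ k, 10 ^ k ≤ n ∧ n < 10 ^ (k + 1) :=
      ⟨Nat.log 10 n, Nat.pow_log_le_self 10 h0, Nat.lt_pow_succ_log_self (by omega) n⟩
    have hd : (Nat.toDigits 10 n).length = k + 1 := pvToDigits_len k n hk1 hk2
    rw [hd]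
    have hR : PySem.Int.floordiv (10 ^ (k + 1) - 1) 9 = (pvR (k + 1) : Int) := by
      have h9 : ((10:Int) ^ (k + 1) - 1) = (pvR (k + 1) : Int) * 9 := by
        have := pvR9 (k + 1)
        have hc : (9 : Int) * (pvR (k + 1) : Int) + 1 = 10 ^ (k + 1) := by exact_mod_cast this
        linarith
      rw [PySem.Int.floordiv_eq_ediv_of_pos (by omega), h9]
      exact Int.mul_ediv_cancel _ (by omega)
    rw [hR]
    have hlen : (catL n).length = 1 + pvB k + (n - 10 ^ k) * (k + 1) + (k + 1) := by
      have hc : catL n = catL (n - 1) ++ Nat.toDigits 10 n := pvCatL_succ (by omega)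
      rw [hc, List.length_append, pvLenCat_form k n hk1 hk2, hd]
    rw [hlen]
    have hsub : ((n - 10 ^ k : Nat) : Int) = (n : Int) - 10 ^ k := by
      push_cast [Nat.cast_sub hk1]; ring
    have hB := pvBR k
    push_cast [hsub]
    nlinarith [hB]

-- each catL n is long enough to contain position n
lemma pvCatL_long : ∀ (n : Nat), n + 1 ≤ (catL n).length := by
  intro n
  induction n with
  | zero => decide
  | succ n ih =>
    show n + 1 + 1 ≤ (catL n ++ Nat.toDigits 10 (n + 1)).length
    rw [List.length_append]
    have := pvToDigits_pos (n + 1)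
    omega

-- the binary-search invariant: the result ρ satisfies total(ρ-1) ≤ index < total(ρ)
lemma pvBS_inv : ∀ (c : Nat) (index lo hi : Int), (hi - lo).toNat = c →
    0 ≤ lo → lo ≤ hi → (lo = 0 ∨ pvTotal (lo - 1) ≤ index) → index < pvTotal hi →
    0 ≤ pvBS index lo hi ∧
      (pvBS index lo hi = 0 ∨ pvTotal (pvBS index lo hi - 1) ≤ index) ∧
      index < pvTotal (pvBS index lo hi) := by
  intro c
  induction c using Nat.strong_induction_on with
  | _ c ih =>
    intro index lo hi hc h0 hle hlo hhi
    rw [pvBS]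
    by_cases h : lo < hi
    · rw [dif_pos h]
      have hmlt : PySem.Int.floordiv (lo + hi) 2 < hi :=
        (PySem.Int.floordiv_lt_iff_lt_mul (by omega)).mpr (by omega)
      have hmle : lo ≤ PySem.Int.floordiv (lo + hi) 2 :=
        (PySem.Int.le_floordiv_iff_mul_le (by omega)).mpr (by omega)
      by_cases hcmp : index < pvTotal (PySem.Int.floordiv (lo + hi) 2)
      · rw [if_pos hcmp]
        exact ih (PySem.Int.floordiv (lo + hi) 2 - lo).toNat (by omega) index lo
          (PySem.Int.floordiv (lo + hi) 2) rfl h0 hmle hlo hcmp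
      · rw [if_neg hcmp]
        refine ih (hi - (PySem.Int.floordiv (lo + hi) 2 + 1)).toNat (by omega) index
          (PySem.Int.floordiv (lo + hi) 2 + 1) hi rfl (by omega) (by omega) ?_ hhi
        right
        simpa using not_lt.mp hcmp
    · rw [dif_neg h]
      have : lo = hi := by omega
      subst this
      exact ⟨h0, hlo, hhi⟩

-- A's value at index ≥ 1 is the r-th digit of some number m, with
-- index = len(catL (m-1)) + r
lemma pvALoop_inv : ∀ (c : Nat) (t : Int) (k : Nat), t.toNat = c → 0 ≤ t →
    ∃ t' k', pvALoop t k = (t', k') ∧ 0 ≤ t' ∧ t' ≤ 9 * 10 ^ k' * ((k' : Int) + 1) ∧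
      (pvB k' : Int) + t' = (pvB k : Int) + t := by
  intro c
  induction c using Nat.strong_induction_on with
  | _ c ih =>
    intro t k hc ht
    rw [pvALoop]
    by_cases h : 9 * 10 ^ k * ((k : Int) + 1) < t
    · rw [if_pos h]
      have hb : (0 : Int) < 9 * 10 ^ k * ((k : Int) + 1) := by positivity
      obtain ⟨t', k', h1, h2, h3, h4⟩ :=
        ih (t - 9 * 10 ^ k * ((k : Int) + 1)).toNat (by omega)
          (t - 9 * 10 ^ k * ((k : Int) + 1)) (k + 1) rfl (by omega)
      refine ⟨t', k', h1, h2, h3, ?_⟩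
      rw [h4]
      have : (pvB (k + 1) : Int) = (pvB k : Int) + 9 * 10 ^ k * ((k : Int) + 1) := by
        show ((pvB k + 9 * 10 ^ k * (k + 1) : Nat) : Int) = _
        push_cast
        ring
      rw [this]
      ring
    · rw [if_neg h]
      exact ⟨t, k, rfl, ht, by omega, rfl⟩

lemma pvA_char (index : Int) (h1 : 1 ≤ index) :
    ∃ (m r : Nat), 1 ≤ m ∧ r < (Nat.toDigits 10 m).length ∧
      index = ((catL (m - 1)).length : Int) + r ∧
      digitAtIndex index =
        ((Nat.toDigits 10 m)[r]?).map (fun c => String.ofList [c]) := by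
  obtain ⟨t, k, hp, ht0, htle, hsum⟩ := pvALoop_inv (index - 1).toNat (index - 1) 0 rfl (by omega)
  have hkpos : (0 : Int) < (k : Int) + 1 := by omega
  have hAval : digitAtIndex index =
      (PySem.Str.pyGet? (PySem.Int.toStr (PySem.Int.floordiv t ((k : Int) + 1) + 10 ^ k))
        (PySem.Int.mod t ((k : Int) + 1))).map (fun c => String.ofList [c]) := by
    unfold digitAtIndex
    rw [if_neg (by omega), if_neg (by omega), hp]
  rcases lt_or_eq_of_le htle with hlt | heq
  · -- interior: m = 10^k + t/(k+1), r = t mod (k+1)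
    set q := PySem.Int.floordiv t ((k : Int) + 1) with hqdef
    set rI := PySem.Int.mod t ((k : Int) + 1) with hrdef
    have hq0 : 0 ≤ q := by
      rw [hqdef, PySem.Int.floordiv_eq_ediv_of_pos hkpos]
      exact Int.ediv_nonneg ht0 (by omega)
    have hqlt : q < 9 * 10 ^ k := by
      rw [hqdef, PySem.Int.floordiv_lt_iff_lt_mul hkpos]
      nlinarith
    have hr0 : 0 ≤ rI := PySem.Int.mod_nonneg _ hkpos
    have hrlt : rI < (k : Int) + 1 := PySem.Int.mod_lt _ hkpos
    have hqr : q * ((k : Int) + 1) + rI = t := PySem.Int.floordiv_mul_add_mod t _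
    set m : Nat := 10 ^ k + q.toNat with hmdef
    set r : Nat := rI.toNat with hrnat
    have hmcast : ((m : Int)) = 10 ^ k + q := by
      rw [hmdef]; push_cast; rw [Int.toNat_of_nonneg hq0]
    have hrcast : ((r : Int)) = rI := Int.toNat_of_nonneg hr0
    have hm1 : 10 ^ k ≤ m := by omega
    have hm2 : m < 10 ^ (k + 1) := by
      have hpow : ((10 ^ (k + 1) : Nat) : Int) = 10 * 10 ^ k := by push_cast; ring
      have : (m : Int) < ((10 ^ (k + 1) : Nat) : Int) := by rw [hpow]; omega
      exact_mod_cast this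
    have hlen : (Nat.toDigits 10 m).length = k + 1 := pvToDigits_len k m hm1 hm2
    refine ⟨m, r, le_trans (Nat.one_le_pow _ _ (by omega)) hm1, by omega, ?_, ?_⟩
    · rw [pvLenCat_form k m hm1 hm2]
      have hsub : m - 10 ^ k = q.toNat := by omega
      have hcast : (((1 + pvB k + (m - 10 ^ k) * (k + 1) : Nat)) : Int)
          = 1 + (pvB k : Int) + q * ((k : Int) + 1) := by
        rw [hsub]; push_cast; rw [Int.toNat_of_nonneg hq0]
      rw [hcast]
      simp [pvB] at hsum
      generalize hQ : q * ((k : Int) + 1) = Q at hqr ⊢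
      omega
    · rw [hAval]
      have hnum : q + 10 ^ k = (m : Int) := by rw [hmcast]; ring
      rw [hnum, PySem.Str.pyGet?]
      have htl : (PySem.Int.toStr (m : Int)).toList = Nat.toDigits 10 m := by
        rw [PySem.Int.toList_toStr, pvToChars_nat]
      rw [htl, ← hrcast, PySem.Chars.pyGet?, PySem.List.pyGet?_natCast]
  · -- boundary: t = 9·10^k·(k+1); m = 10^(k+1), r = 0
    set m : Nat := 10 ^ (k + 1) with hmdef
    have hm1 : 10 ^ (k + 1) ≤ m := le_refl _
    have hm2 : m < 10 ^ (k + 2) := Nat.pow_lt_pow_right (by omega) (by omega)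
    have hlen : (Nat.toDigits 10 m).length = k + 2 := pvToDigits_len (k + 1) m hm1 hm2
    refine ⟨m, 0, le_trans (Nat.one_le_pow _ _ (by omega)) hm1, by omega, ?_, ?_⟩
    · rw [pvLenCat_form (k + 1) m hm1 hm2]
      have hsub : m - 10 ^ (k + 1) = 0 := by omega
      rw [hsub]
      have hB : ((pvB (k + 1) : Nat) : Int) = (pvB k : Int) + 9 * 10 ^ k * ((k : Int) + 1) := by
        show ((pvB k + 9 * 10 ^ k * (k + 1) : Nat) : Int) = _
        push_cast; ring
      simp [pvB] at hsum
      push_cast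
      rw [hB] at *
      generalize hP : 9 * (10 : Int) ^ k * ((k : Int) + 1) = P at heq hB ⊢
      omega
    · rw [hAval, heq]
      have hq : PySem.Int.floordiv (9 * 10 ^ k * ((k : Int) + 1)) ((k : Int) + 1) = 9 * 10 ^ k := by
        rw [PySem.Int.floordiv_eq_ediv_of_pos hkpos]
        exact Int.mul_ediv_cancel _ (by omega)
      have hr : PySem.Int.mod (9 * 10 ^ k * ((k : Int) + 1)) ((k : Int) + 1) = 0 := by
        rw [PySem.Int.mod_eq_zero_iff_dvd]
        exact dvd_mul_left _ _
      rw [hq, hr]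
      have hnum : (9 * 10 ^ k + 10 ^ k : Int) = ((m : Nat) : Int) := by
        rw [hmdef]; push_cast; ring
      rw [hnum, PySem.Str.pyGet?]
      have htl : (PySem.Int.toStr (m : Int)).toList = Nat.toDigits 10 m := by
        rw [PySem.Int.toList_toStr, pvToChars_nat]
      rw [htl, PySem.Chars.pyGet?, show (0 : Int) = ((0 : Nat) : Int) from rfl,
        PySem.List.pyGet?_natCast]

-- B's value at such an index is the same digit
lemma pvB_char (index : Int) (h1 : 1 ≤ index) (m r : Nat) (hm : 1 ≤ m)
    (hr : r < (Nat.toDigits 10 m).length)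
    (hi : index = ((catL (m - 1)).length : Int) + r) :
    digitAtIndex_alt index =
      ((Nat.toDigits 10 m)[r]?).map (fun c => String.ofList [c]) := by
  unfold digitAtIndex_alt
  rw [if_neg (by omega)]
  show (PySem.Str.pyGet? (PySem.Int.toStr (pvBS index 0 index))
      (index - (pvTotal (pvBS index 0 index)
        - (((PySem.Int.toChars (pvBS index 0 index)).length : Nat) : Int)))).map
      (fun c => String.ofList [c]) = _
  have hhi : index < pvTotal index := by
    have hidx : index = ((index.toNat : Nat) : Int) := by omega
    rw [hidx, pvTotal_eq index.toNat]
    have := pvCatL_long index.toNat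
    omega
  obtain ⟨hρ0, hρlo, hρhi⟩ :=
    pvBS_inv index.toNat index 0 index (by omega) (by omega) (by omega) (Or.inl rfl) hhi
  set ρ := pvBS index 0 index with hρdef
  set nN : Nat := ρ.toNat with hndef
  have hρcast : (nN : Int) = ρ := Int.toNat_of_nonneg hρ0
  have hn1 : 1 ≤ nN := by
    rcases hρlo with h | h
    · exfalso
      rw [h] at hρhi
      have : pvTotal 0 = 1 := by decide
      omega
    · by_contra hcon
      have : ρ = 0 := by omega
      rw [this] at hρhi
      have : pvTotal 0 = 1 := by decide
      omega
  have hlo : pvTotal (ρ - 1) ≤ index := by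
    rcases hρlo with h | h
    · omega
    · exact h
  have hcast1 : (ρ - 1) = (((nN - 1 : Nat) : Nat) : Int) := by omega
  rw [hcast1, pvTotal_eq (nN - 1)] at hlo
  rw [← hρcast, pvTotal_eq nN] at hρhi
  -- the offset into str(ρ)
  have hdlen : (PySem.Int.toChars ((nN : Nat) : Int)).length = (Nat.toDigits 10 nN).length := by
    rw [pvToChars_nat]
  have hsplit : (catL nN).length = (catL (nN - 1)).length + (Nat.toDigits 10 nN).length := by
    rw [pvCatL_succ hn1, List.length_append]
  set r0 : Nat := index.toNat - (catL (nN - 1)).length with hr0def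
  have hr0lt : r0 < (Nat.toDigits 10 nN).length := by omega
  have hioff : index - (pvTotal ρ - ((PySem.Int.toChars ρ).length : Int)) = ((r0 : Nat) : Int) := by
    rw [← hρcast, pvTotal_eq nN, hdlen]
    omega
  rw [← hρdef] at *
  rw [hioff, PySem.Str.pyGet?]
  have htl : (PySem.Int.toStr ρ).toList = Nat.toDigits 10 nN := by
    rw [← hρcast, PySem.Int.toList_toStr, pvToChars_nat]
  rw [htl, PySem.Chars.pyGet?, PySem.List.pyGet?_natCast]
  congr 1
  -- both digits are the character of the full sequence at position index
  have hA : (Nat.toDigits 10 m)[r]? = (catL m)[(catL (m - 1)).length + r]? :=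
    (pvCatL_char hm r).symm
  have hB' : (Nat.toDigits 10 nN)[r0]? = (catL nN)[(catL (nN - 1)).length + r0]? :=
    (pvCatL_char hn1 r0).symm
  have hiA : (catL (m - 1)).length + r = index.toNat := by omega
  have hiB : (catL (nN - 1)).length + r0 = index.toNat := by omega
  rw [hB', hA, hiA, hiB]
  have hmA : index.toNat < (catL m).length := by
    rw [pvCatL_succ hm, List.length_append]; omega
  have hmB : index.toNat < (catL nN).length := by omega
  exact (pvCatL_get hmB hmA)

-- ===== VERDICT =====
theorem digitAtIndex_spec : Claim_equal_digitAtIndex := by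
  intro index _ hpre
  unfold Spec_digitAtIndex
  by_cases hneg : index < 0
  · unfold digitAtIndex digitAtIndex_alt
    simp [hneg]
  · have hne : index ≠ 0 := hpre
    obtain ⟨m, r, hm, hr, hi, hA⟩ := pvA_char index (by omega)
    rw [hA, pvB_char index (by omega) m r hm hr hi]
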